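-- pv_equiv track=rewrite | github.com/WiLGYSeF/pycolor | pattern.py | get_activation_ranges
-- ===== SOURCE A (Python) =====
-- def get_activation_ranges(activations, deactivations):
--     ranges = []
--     ranges.extend(map(lambda x: (x, True), activations))
--     ranges.extend(map(lambda x: (x, False), deactivations))
--     ranges.sort(key=lambda x: x[0])
--
--     idx = 0
--     while idx < len(ranges) and ranges[idx][0] < 0:
--         idx += 1
--     if idx == len(ranges):
--         return []
--
--     new_ranges = [ ranges[idx] ]
--
--     while idx < len(ranges):
--         if all([
--             ranges[idx][0] >= 0,
--             ranges[idx][0] != new_ranges[-1][0],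
--             ranges[idx][1] != new_ranges[-1][1]
--         ]):
--             new_ranges.append(ranges[idx])
--         idx += 1
--
--     return new_ranges
-- ===== SOURCE B (Python) =====
-- def get_activation_ranges(activations, deactivations):
--     acts = sorted(activations)
--     deacts = sorted(deactivations)
--
--     # merge the two sorted streams, tagging as we go; ties favour activations
--     merged = []
--     i = j = 0
--     while i < len(acts) and j < len(deacts):
--         if acts[i] <= deacts[j]:
--             merged.append((acts[i], True))
--             i += 1
--         else:
--             merged.append((deacts[j], False))
--             j += 1
--     merged.extend((x, True) for x in acts[i:])
--     merged.extend((x, False) for x in deacts[j:])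
--
--     # one pass: skip negatives, keep a point only when both position and type change
--     res = []
--     for p, t in merged:
--         if p < 0:
--             continue
--         if not res or (p != res[-1][0] and t != res[-1][1]):
--             res.append((p, t))
--     return res
-- ===== Notes on version B (the rewrite author's own statement) =====
-- stated objective: alternative
-- what changed: B sorts activations and deactivations separately and joins them with a tie-favouring-activations two-pointer merge that tags points on the fly, then filters in one pass keeping the last kept point, instead of A's combined stable sort followed by an index-scan skip loop plus a second while loop.
import Mathlib
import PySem

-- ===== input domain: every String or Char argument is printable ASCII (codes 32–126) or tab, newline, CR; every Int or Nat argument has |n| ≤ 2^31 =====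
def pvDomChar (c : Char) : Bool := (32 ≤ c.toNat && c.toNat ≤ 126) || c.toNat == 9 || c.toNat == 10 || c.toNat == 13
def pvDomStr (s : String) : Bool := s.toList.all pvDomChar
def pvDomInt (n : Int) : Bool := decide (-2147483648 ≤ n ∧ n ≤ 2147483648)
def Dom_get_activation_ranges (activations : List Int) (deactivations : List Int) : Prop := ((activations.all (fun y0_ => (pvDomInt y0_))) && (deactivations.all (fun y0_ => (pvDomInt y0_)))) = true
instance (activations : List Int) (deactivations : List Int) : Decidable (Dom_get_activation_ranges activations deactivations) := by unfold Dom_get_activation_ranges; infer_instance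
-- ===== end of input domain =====

-- B merges the two individually sorted point lists with a tie-favouring-activations
-- two-pointer merge instead of one combined stable sort (objective: alternative, same cost).

-- ===== PORT A =====
-- the `while idx < len(ranges) and ranges[idx][0] < 0` scan: returns the suffix from idx
def pvSkipNegA : List (Int × Bool) → List (Int × Bool)
  | [] => []
  | r :: rest => if r.1 < 0 then pvSkipNegA rest else r :: rest

-- the second while loop: new_ranges[-1] is the Python negative index (list is never empty)
def pvLoopA : List (Int × Bool) → List (Int × Bool) → List (Int × Bool)
  | [], new_ranges => new_ranges
  | r :: rest, new_ranges =>
      if 0 ≤ r.1 ∧ r.1 ≠ (PySem.List.pyGetD new_ranges (-1) (0, false)).1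
            ∧ r.2 ≠ (PySem.List.pyGetD new_ranges (-1) (0, false)).2
      then pvLoopA rest (new_ranges ++ [r])
      else pvLoopA rest new_ranges

def get_activation_ranges (activations : List Int) (deactivations : List Int) : List (Int × Bool) :=
  let ranges := PySem.List.sorted
    (activations.map (fun x => (x, true)) ++ deactivations.map (fun x => (x, false)))
    (fun x => x.1) false
  match pvSkipNegA ranges with
  | [] => []
  | r :: rest => pvLoopA (r :: rest) [r]

-- ===== PORT B =====
-- two-pointer merge of the two sorted int lists, tagging as it goes; ties favour activations
def pvMergeTag : List Int → List Int → List (Int × Bool)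
  | [], ds => ds.map (fun y => (y, false))
  | x :: xs, [] => (x :: xs).map (fun x => (x, true))
  | x :: xs, y :: ys =>
      if x ≤ y then (x, true) :: pvMergeTag xs (y :: ys)
      else (y, false) :: pvMergeTag (x :: xs) ys

-- the single filter pass of Source B (res[-1] read through getLast?, `not res` is the none case)
def pvPassB : List (Int × Bool) → List (Int × Bool) → List (Int × Bool)
  | [], res => res
  | (p, t) :: rest, res =>
      if p < 0 then pvPassB rest res
      else
        match res.getLast? with
        | none => pvPassB rest (res ++ [(p, t)])
        | some l =>
            if p ≠ l.1 ∧ t ≠ l.2 then pvPassB rest (res ++ [(p, t)])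
            else pvPassB rest res

def get_activation_ranges_alt (activations : List Int) (deactivations : List Int) : List (Int × Bool) :=
  pvPassB
    (pvMergeTag (PySem.List.sorted activations (fun x => x) false)
                (PySem.List.sorted deactivations (fun x => x) false))
    []

-- ===== PRECONDITION & SPEC =====
def Spec_get_activation_ranges (activations : List Int) (deactivations : List Int) (out : List (Int × Bool)) : Prop := out = get_activation_ranges_alt activations deactivations
instance (activations : List Int) (deactivations : List Int) (out : List (Int × Bool)) : Decidable (Spec_get_activation_ranges activations deactivations out) := by unfold Spec_get_activation_ranges; infer_instance

-- ===== CLAIM (what is proved, stated in full; the proofs are below) =====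
def Claim_equal_get_activation_ranges : Prop := ∀ (activations : List Int) (deactivations : List Int), Dom_get_activation_ranges activations deactivations → Spec_get_activation_ranges activations deactivations (get_activation_ranges activations deactivations)

-- ===== LEMMAS AND PROOFS =====

-- the total order 'sorted by position, activations before deactivations on ties'
theorem pvMergeTag_perm (xs ys : List Int) :
    (pvMergeTag xs ys).Perm (xs.map (fun x => (x, true)) ++ ys.map (fun y => (y, false))) := by
  induction xs, ys using pvMergeTag.induct with
  | case1 ds => simp [pvMergeTag]
  | case2 x xs => simp [pvMergeTag]
  | case3 x xs y ys h ih =>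
      rw [pvMergeTag, if_pos h]
      exact (ih.cons _)
  | case4 x xs y ys h ih =>
      rw [pvMergeTag, if_neg h]
      refine (ih.cons (y, false)).trans ?_
      simp only [List.map_cons]
      exact (List.Perm.symm (List.perm_middle))

def pvR (x y : Int × Bool) : Prop := x.1 < y.1 ∨ (x.1 = y.1 ∧ (x.2 = true ∨ y.2 = false))

theorem mem_pvMergeTag {z : Int × Bool} {xs ys : List Int} (h : z ∈ pvMergeTag xs ys) :
    (z.2 = true ∧ z.1 ∈ xs) ∨ (z.2 = false ∧ z.1 ∈ ys) := by
  have := (pvMergeTag_perm xs ys).mem_iff.mp h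
  simp only [List.mem_append, List.mem_map] at this
  rcases this with ⟨x, hx, he⟩ | ⟨y, hy, he⟩
  · left; exact ⟨by rw [← he], by rw [← he]; exact hx⟩
  · right; exact ⟨by rw [← he], by rw [← he]; exact hy⟩

theorem pvMergeTag_pairwise {xs ys : List Int}
    (hx : xs.Pairwise (· ≤ ·)) (hy : ys.Pairwise (· ≤ ·)) :
    (pvMergeTag xs ys).Pairwise pvR := by
  induction xs, ys using pvMergeTag.induct with
  | case1 ds =>
      rw [pvMergeTag, List.pairwise_map]
      refine hy.imp (fun h => ?_)
      unfold pvR; rcases h.lt_or_eq with h' | h'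
      · exact Or.inl h'
      · exact Or.inr ⟨h', Or.inr rfl⟩
  | case2 x xs =>
      rw [pvMergeTag, List.pairwise_map]
      refine hx.imp (fun h => ?_)
      unfold pvR; rcases h.lt_or_eq with h' | h'
      · exact Or.inl h'
      · exact Or.inr ⟨h', Or.inl rfl⟩
  | case3 x xs y ys h ih =>
      rw [pvMergeTag, if_pos h]
      rcases List.pairwise_cons.mp hx with ⟨hxh, hxt⟩
      refine List.pairwise_cons.mpr ⟨?_, ih hxt hy⟩
      intro z hz
      rcases mem_pvMergeTag hz with ⟨_, hz1⟩ | ⟨hz2, hz1⟩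
      · have := hxh _ hz1
        unfold pvR; rcases this.lt_or_eq with h' | h'
        · exact Or.inl h'
        · exact Or.inr ⟨h', Or.inl rfl⟩
      · have hyz : y ≤ z.1 := by
          rcases List.mem_cons.mp hz1 with h' | h'
          · omega
          · exact List.rel_of_pairwise_cons hy h'
        have := le_trans h hyz
        unfold pvR; rcases this.lt_or_eq with h' | h'
        · exact Or.inl h'
        · exact Or.inr ⟨h', Or.inl rfl⟩
  | case4 x xs y ys h ih =>
      rw [pvMergeTag, if_neg h]
      rcases List.pairwise_cons.mp hy with ⟨hyh, hyt⟩
      refine List.pairwise_cons.mpr ⟨?_, ih hx hyt⟩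
      intro z hz
      rcases mem_pvMergeTag hz with ⟨_, hz1⟩ | ⟨hz2, hz1⟩
      · have hxz : x ≤ z.1 := by
          rcases List.mem_cons.mp hz1 with h' | h'
          · omega
          · exact List.rel_of_pairwise_cons hx h'
        exact Or.inl (by omega)
      · have := hyh _ hz1
        unfold pvR; rcases this.lt_or_eq with h' | h'
        · exact Or.inl h'
        · exact Or.inr ⟨h', Or.inr hz2⟩

theorem pvR_le {x y : Int × Bool} (h : pvR x y) : x.1 ≤ y.1 := by
  rcases h with h | ⟨h, _⟩ <;> omega

theorem pvR_insertBy (z : Int × Bool) (acc : List (Int × Bool))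
    (hz : ∀ w ∈ acc, w.1 ≤ z.1 → pvR w z) (hp : acc.Pairwise pvR) :
    (PySem.List.insertBy (fun a b => decide (a.1 < b.1)) z acc).Pairwise pvR := by
  induction acc with
  | nil => simp [PySem.List.insertBy]
  | cons y ys ih =>
      rcases List.pairwise_cons.mp hp with ⟨hyh, hyt⟩
      rw [PySem.List.insertBy]
      by_cases hlt : z.1 < y.1
      · simp only [hlt, decide_true, if_true]
        refine List.pairwise_cons.mpr ⟨?_, hp⟩
        intro w hw
        rcases List.mem_cons.mp hw with h' | h'
        · subst h'; exact Or.inl hlt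
        · exact Or.inl (lt_of_lt_of_le hlt (pvR_le (hyh _ h')))
      · simp only [hlt, decide_false]
        refine List.pairwise_cons.mpr ⟨?_, ih (fun w hw => hz w (List.mem_cons_of_mem _ hw)) hyt⟩
        intro w hw
        rcases (PySem.List.mem_insertBy _ _ _ _).mp hw with h' | h'
        · subst h'; exact hz y (List.mem_cons_self) (by omega)
        · exact hyh _ h'

theorem pvFoldl_true (xs : List (Int × Bool)) (hxs : ∀ x ∈ xs, x.2 = true)
    (acc : List (Int × Bool)) (hacc : ∀ w ∈ acc, w.2 = true) (hp : acc.Pairwise pvR) :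
    (∀ w ∈ xs.foldl (fun acc x => PySem.List.insertBy (fun a b => decide (a.1 < b.1)) x acc) acc, w.2 = true) ∧
    (xs.foldl (fun acc x => PySem.List.insertBy (fun a b => decide (a.1 < b.1)) x acc) acc).Pairwise pvR := by
  induction xs generalizing acc with
  | nil => exact ⟨hacc, hp⟩
  | cons x xs ih =>
      simp only [List.foldl_cons]
      refine ih (fun w hw => hxs w (List.mem_cons_of_mem _ hw)) _ ?_ ?_
      · intro w hw
        rcases (PySem.List.mem_insertBy _ _ _ _).mp hw with h' | h'
        · subst h'; exact hxs _ List.mem_cons_self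
        · exact hacc _ h'
      · refine pvR_insertBy _ _ ?_ hp
        intro w hw hle
        rcases lt_or_eq_of_le hle with h' | h'
        · exact Or.inl h'
        · exact Or.inr ⟨h', Or.inl (hacc _ hw)⟩

theorem pvFoldl_false (xs : List (Int × Bool)) (hxs : ∀ x ∈ xs, x.2 = false)
    (acc : List (Int × Bool)) (hp : acc.Pairwise pvR) :
    (xs.foldl (fun acc x => PySem.List.insertBy (fun a b => decide (a.1 < b.1)) x acc) acc).Pairwise pvR := by
  induction xs generalizing acc with
  | nil => exact hp
  | cons x xs ih =>
      simp only [List.foldl_cons]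
      refine ih (fun w hw => hxs w (List.mem_cons_of_mem _ hw)) _ ?_
      refine pvR_insertBy _ _ ?_ hp
      intro w hw hle
      rcases lt_or_eq_of_le hle with h' | h'
      · exact Or.inl h'
      · exact Or.inr ⟨h', Or.inr (hxs _ List.mem_cons_self)⟩

theorem pvSorted_pairwise_pvR (a d : List Int) :
    (PySem.List.sorted (a.map (fun x => (x, true)) ++ d.map (fun x => (x, false)))
      (fun x => x.1) false).Pairwise pvR := by
  rw [PySem.List.sorted_eq_foldl_insertBy, List.foldl_append]
  refine pvFoldl_false _ (by simp) _ ?_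
  exact (pvFoldl_true _ (by simp) [] (by simp) (by simp)).2

theorem pvMergeTag_eq_sorted (a d : List Int) :
    pvMergeTag (PySem.List.sorted a (fun x => x) false) (PySem.List.sorted d (fun x => x) false)
      = PySem.List.sorted (a.map (fun x => (x, true)) ++ d.map (fun x => (x, false)))
          (fun x => x.1) false := by
  refine List.Perm.eq_of_pairwise (le := pvR) ?_ ?_ ?_ ?_
  · intro u v _ _ huv hvu
    have h1 : u.1 = v.1 := le_antisymm (pvR_le huv) (pvR_le hvu)
    refine Prod.ext h1 ?_
    rcases huv with h | ⟨_, h2⟩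
    · omega
    rcases hvu with h | ⟨_, h2'⟩
    · omega
    rcases h2 with h2 | h2 <;> rcases h2' with h2' | h2' <;> first | rw [h2, h2'] | simp [h2] at h2'
  · exact pvMergeTag_pairwise
      ((PySem.List.sorted_pairwise a (fun x => x) : _))
      ((PySem.List.sorted_pairwise d (fun x => x) : _))
  · exact pvSorted_pairwise_pvR a d
  · refine (pvMergeTag_perm _ _).trans ?_
    refine List.Perm.trans (List.Perm.append (((PySem.List.sorted_perm a _ false).map _ : _))
      (((PySem.List.sorted_perm d _ false).map _ : _))) ?_
    exact (PySem.List.sorted_perm _ _ false).symm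




theorem pvLoop_eq_pass (rest : List (Int × Bool)) (acc : List (Int × Bool))
    (hne : acc ≠ []) (hnn : ∀ w ∈ rest, 0 ≤ w.1) :
    pvLoopA rest acc = pvPassB rest acc := by
  induction rest generalizing acc with
  | nil => rfl
  | cons w rest ih =>
      obtain ⟨p, t⟩ := w
      have hp : 0 ≤ p := hnn (p, t) List.mem_cons_self
      have hlast : acc.getLast? = some (acc.getLast hne) := List.getLast?_eq_some_getLast hne
      have hnneg : ¬ p < 0 := by omega
      have htail := fun w hw => hnn w (List.mem_cons_of_mem _ hw)
      rw [pvLoopA, PySem.List.pyGetD_neg_one acc (0, false) hne]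
      by_cases hc : p ≠ (acc.getLast hne).1 ∧ t ≠ (acc.getLast hne).2
      · rw [if_pos ⟨hp, hc.1, hc.2⟩]
        simp only [pvPassB, hlast, if_neg hnneg, if_pos hc]
        exact ih _ (by simp) htail
      · rw [if_neg (fun h => hc ⟨h.2.1, h.2.2⟩)]
        simp only [pvPassB, hlast, if_neg hnneg, if_neg hc]
        exact ih _ hne htail

theorem pvA_eq_passB (zs : List (Int × Bool)) (hs : zs.Pairwise (fun u v => u.1 ≤ v.1)) :
    (match pvSkipNegA zs with
     | [] => ([] : List (Int × Bool))
     | r :: rest => pvLoopA (r :: rest) [r]) = pvPassB zs [] := by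
  induction zs with
  | nil => rfl
  | cons z rest ih =>
      obtain ⟨p, t⟩ := z
      rcases List.pairwise_cons.mp hs with ⟨hzh, ht⟩
      by_cases hneg : p < 0
      · rw [pvSkipNegA, if_pos hneg, pvPassB, if_pos hneg]
        exact ih ht
      · rw [pvSkipNegA, if_neg hneg, pvPassB, if_neg hneg]
        simp only [List.getLast?_nil, List.nil_append]
        rw [pvLoopA, PySem.List.pyGetD_neg_one [(p, t)] (0, false) (by simp),
          if_neg (by simp)]
        exact pvLoop_eq_pass rest [(p, t)] (by simp)
          (fun w hw => le_trans (by omega) (hzh w hw))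

-- ===== VERDICT (by name: the statement is the Claim_ definition above) =====
theorem get_activation_ranges_spec : Claim_equal_get_activation_ranges := by
  intro a d _
  unfold Spec_get_activation_ranges get_activation_ranges get_activation_ranges_alt
  rw [pvMergeTag_eq_sorted]
  exact pvA_eq_passB _ ((pvSorted_pairwise_pvR a d).imp pvR_le)
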